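-- pv_equiv track=rewrite | github.com/GitRiyaJana/Light_weight_cryptography | Impossible/enc_dec_gim_corrected_2rounds.py | sbox_lanes
-- ===== SOURCE A (Python) =====
-- SBOX = [7, 4, 6, 1, 0, 5, 2, 3]
--
-- def sbox_lanes(x, y, z):
--     new_x, new_y, new_z = [], [], []
--     for xi, yi, zi in zip(x, y, z):
--         sx = sy = sz = 0
--         for bit in range(32):
--             a = (xi >> bit) & 1
--             b = (yi >> bit) & 1
--             c = (zi >> bit) & 1
--             val = SBOX[(a << 2) | (b << 1) | c]
--             sx |= ((val >> 2) & 1) << bit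
--             sy |= ((val >> 1) & 1) << bit
--             sz |= (val & 1) << bit
--         new_x.append(sx)
--         new_y.append(sy)
--         new_z.append(sz)
--     return new_x, new_y, new_z
-- ===== SOURCE B (Python) =====
-- M = 0xFFFFFFFF
--
-- def _sbox_word(X, Y, Z):
--     # bit-sliced S-box [7,4,6,1,0,5,2,3]: each output bit as a whole-word Boolean function
--     nX = X ^ M
--     nY = Y ^ M
--     nZ = Z ^ M
--     sx = (nX & (M ^ (Y & Z))) | (X & nY & Z)
--     sy = (nZ & (nX | Y)) | (X & Y & Z)
--     sz = (nX & (M ^ (Y ^ Z))) | (X & Z)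
--     return sx, sy, sz
--
-- def sbox_lanes(x, y, z):
--     out = [_sbox_word(xi % 0x100000000, yi % 0x100000000, zi % 0x100000000)
--            for xi, yi, zi in zip(x, y, z)]
--     return [t[0] for t in out], [t[1] for t in out], [t[2] for t in out]
-- ===== Notes on version B (the rewrite author's own statement) =====
-- stated objective: faster
-- what changed: Replaces the per-lane 32-iteration bit loop with a bit-sliced evaluation: each S-box output bit is computed for all 32 bit positions at once by whole-word Boolean formulas derived from the S-box table.
import Mathlib
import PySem

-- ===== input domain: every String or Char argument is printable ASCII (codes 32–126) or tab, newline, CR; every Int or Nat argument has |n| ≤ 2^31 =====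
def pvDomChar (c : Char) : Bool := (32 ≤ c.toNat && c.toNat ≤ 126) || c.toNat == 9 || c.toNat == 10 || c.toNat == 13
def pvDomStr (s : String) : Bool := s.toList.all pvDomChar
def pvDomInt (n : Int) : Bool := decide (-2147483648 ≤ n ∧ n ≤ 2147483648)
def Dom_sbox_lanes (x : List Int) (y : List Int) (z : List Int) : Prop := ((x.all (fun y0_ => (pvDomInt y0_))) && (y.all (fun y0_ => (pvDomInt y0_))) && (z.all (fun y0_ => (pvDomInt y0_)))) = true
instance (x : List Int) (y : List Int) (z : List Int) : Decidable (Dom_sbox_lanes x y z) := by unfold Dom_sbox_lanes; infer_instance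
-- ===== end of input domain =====

-- B replaces A's per-lane loop over the 32 bit positions by a bit-sliced evaluation: each
-- S-box output bit is computed for all 32 positions at once by whole-word Boolean formulas
-- (objective: faster by a constant factor; exact same return value).

-- ===== PORT A =====
def pvSBOX : List Int := [7, 4, 6, 1, 0, 5, 2, 3]

-- one iteration of A's inner `for bit in range(32)` loop
def pvAStep (xi yi zi : Int) (s : Int × Int × Int) (bit : Int) : Int × Int × Int :=
  let k := bit.toNat   -- exact: pyRange 0 32 yields only nonnegative values
  let a := PySem.Int.band (xi >>> k) 1
  let b := PySem.Int.band (yi >>> k) 1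
  let c := PySem.Int.band (zi >>> k) 1
  -- SBOX[(a << 2) | (b << 1) | c]; the index is provably 0..7 so pyGet? is `some` and `.getD 0` never fires
  let val := (PySem.List.pyGet? pvSBOX
      (PySem.Int.bor (PySem.Int.bor (a <<< (2 : Nat)) (b <<< (1 : Nat))) c)).getD 0
  (PySem.Int.bor s.1 ((PySem.Int.band (val >>> (2 : Nat)) 1) <<< k),
   PySem.Int.bor s.2.1 ((PySem.Int.band (val >>> (1 : Nat)) 1) <<< k),
   PySem.Int.bor s.2.2 ((PySem.Int.band val 1) <<< k))

-- A's inner loop: sx = sy = sz = 0; for bit in range(32): …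
def pvALane (xi yi zi : Int) : Int × Int × Int :=
  (PySem.List.pyRange 0 32).foldl (pvAStep xi yi zi) (0, 0, 0)

def sbox_lanes (x : List Int) (y : List Int) (z : List Int) : List Int × List Int × List Int :=
  (x.zip (y.zip z)).foldl
    (fun (acc : List Int × List Int × List Int) t =>
      let s := pvALane t.1 t.2.1 t.2.2
      (acc.1 ++ [s.1], acc.2.1 ++ [s.2.1], acc.2.2 ++ [s.2.2]))
    ([], [], [])

-- ===== PORT B =====
def pvM : Int := 4294967295

-- _sbox_word of Source B: whole-word Boolean formulas for the three S-box output bits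
def pvBWord (X Y Z : Int) : Int × Int × Int :=
  let nX := PySem.Int.bxor X pvM
  let nY := PySem.Int.bxor Y pvM
  let nZ := PySem.Int.bxor Z pvM
  (PySem.Int.bor (PySem.Int.band nX (PySem.Int.bxor pvM (PySem.Int.band Y Z)))
     (PySem.Int.band (PySem.Int.band X nY) Z),
   PySem.Int.bor (PySem.Int.band nZ (PySem.Int.bor nX Y))
     (PySem.Int.band (PySem.Int.band X Y) Z),
   PySem.Int.bor (PySem.Int.band nX (PySem.Int.bxor pvM (PySem.Int.bxor Y Z)))
     (PySem.Int.band X Z))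

def sbox_lanes_alt (x : List Int) (y : List Int) (z : List Int) : List Int × List Int × List Int :=
  let out := (x.zip (y.zip z)).map (fun t =>
    pvBWord (PySem.Int.mod t.1 4294967296) (PySem.Int.mod t.2.1 4294967296)
      (PySem.Int.mod t.2.2 4294967296))
  (out.map (fun t => t.1), out.map (fun t => t.2.1), out.map (fun t => t.2.2))

-- ===== PRECONDITION & SPEC =====
def Spec_sbox_lanes (x : List Int) (y : List Int) (z : List Int) (out : List Int × List Int × List Int) : Prop := out = sbox_lanes_alt x y z
instance (x : List Int) (y : List Int) (z : List Int) (out : List Int × List Int × List Int) : Decidable (Spec_sbox_lanes x y z out) := by unfold Spec_sbox_lanes; infer_instance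

-- ===== CLAIM (what is proved, stated in full; the proofs are below) =====
def Claim_equal_sbox_lanes : Prop := ∀ (x : List Int) (y : List Int) (z : List Int), Dom_sbox_lanes x y z → Spec_sbox_lanes x y z (sbox_lanes x y z)

-- ===== LEMMAS AND PROOFS =====

-- Nat-level model of A's per-bit computation
def pvBit (m k : Nat) : Nat := (m >>> k) &&& 1

def pvVal (a b c : Nat) : Nat := [7, 4, 6, 1, 0, 5, 2, 3].getD ((a <<< 2) ||| (b <<< 1) ||| c) 0

def pvGX (mx my mz k : Nat) : Nat := (pvVal (pvBit mx k) (pvBit my k) (pvBit mz k) >>> 2) &&& 1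
def pvGY (mx my mz k : Nat) : Nat := (pvVal (pvBit mx k) (pvBit my k) (pvBit mz k) >>> 1) &&& 1
def pvGZ (mx my mz k : Nat) : Nat := pvVal (pvBit mx k) (pvBit my k) (pvBit mz k) &&& 1

def pvMask (a : Int) : Nat := (PySem.Int.mod a 4294967296).toNat

-- Nat-level model of B's formulas
def pvMN : Nat := 4294967295
def pvFX (mx my mz : Nat) : Nat := ((mx ^^^ pvMN) &&& (pvMN ^^^ (my &&& mz))) ||| ((mx &&& (my ^^^ pvMN)) &&& mz)
def pvFY (mx my mz : Nat) : Nat := ((mz ^^^ pvMN) &&& ((mx ^^^ pvMN) ||| my)) ||| ((mx &&& my) &&& mz)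
def pvFZ (mx my mz : Nat) : Nat := ((mx ^^^ pvMN) &&& (pvMN ^^^ (my ^^^ mz))) ||| (mx &&& mz)

lemma pvMask_cast (a : Int) : ((pvMask a : Nat) : Int) = PySem.Int.mod a 4294967296 := by
  exact Int.toNat_of_nonneg (PySem.Int.mod_nonneg a (by norm_num))

lemma pvMask_lt (a : Int) : pvMask a < 2 ^ 32 := by
  have h := PySem.Int.mod_lt a (b := 4294967296) (by norm_num)
  have h0 := PySem.Int.mod_nonneg a (b := 4294967296) (by norm_num)
  unfold pvMask; omega

lemma pvBit_lt (m k : Nat) : pvBit m k < 2 := by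
  unfold pvBit; rw [Nat.and_one_is_mod]; exact Nat.mod_lt _ (by norm_num)

-- A's bit extraction `(x >> k) & 1` reads bit k of the low 32 bits of x (for k < 32)
lemma pvBand_shift_one (x : Int) (k : Nat) (hk : k < 32) :
    PySem.Int.band (x >>> k) 1 = ((pvBit (pvMask x) k : Nat) : Int) := by
  rw [PySem.Int.band_one, PySem.Int.mod_eq_emod_of_pos (by norm_num),
    Int.shiftRight_eq_div_pow]
  unfold pvBit
  rw [Nat.shiftRight_eq_div_pow, Nat.and_one_is_mod]
  have hmask : ((pvMask x : Nat) : Int) = x % 4294967296 := by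
    rw [pvMask_cast, PySem.Int.mod_eq_emod_of_pos (by norm_num)]
  have hdecomp : x = 4294967296 * (x / 4294967296) + x % 4294967296 := by omega
  set q : Int := x / 4294967296 with hq
  set r : Int := x % 4294967296 with hr
  have hpow : (4294967296 : Int) = 2 ^ (32 - k) * 2 ^ k := by
    have hk32 : 32 - k + k = 32 := by omega
    rw [← pow_add, hk32]; norm_num
  have hx2 : x = r + (q * 2 ^ (32 - k)) * 2 ^ k := by
    rw [hdecomp, hpow]; ring
  have hdiv : x / (2 ^ k : Nat) = r / 2 ^ k + q * 2 ^ (32 - k) := by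
    rw [hx2]
    push_cast
    exact Int.add_mul_ediv_right _ _ (by positivity)
  rw [hdiv]
  have h2 : (2 : Int) ^ (32 - k) = 2 ^ (31 - k) * 2 := by rw [← pow_succ]; congr 1; omega
  have hmod : (r / 2 ^ k + q * 2 ^ (32 - k)) % 2 = (r / 2 ^ k) % 2 := by
    rw [h2, show r / 2 ^ k + q * (2 ^ (31 - k) * 2) = r / 2 ^ k + 2 * (q * 2 ^ (31 - k)) by ring]
    exact Int.add_mul_emod_self_left (a := r / 2 ^ k) (b := 2) (c := q * 2 ^ (31 - k))
  rw [hmod, ← hmask]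
  push_cast [Int.natCast_div]
  norm_num

-- the S-box lookup on 0/1 bits, lifted to the Nat table
lemma pvVal_lift (a b c : Nat) (ha : a < 2) (hb : b < 2) (hc : c < 2) :
    (PySem.List.pyGet? pvSBOX
        (PySem.Int.bor (PySem.Int.bor (((a : Nat) : Int) <<< (2 : Nat)) (((b : Nat) : Int) <<< (1 : Nat))) ((c : Nat) : Int))).getD 0
      = ((pvVal a b c : Nat) : Int) := by
  interval_cases a <;> interval_cases b <;> interval_cases c <;> decide

lemma pvShiftBand (v j : Nat) :
    PySem.Int.band (((v : Nat) : Int) >>> j) 1 = (((v >>> j) &&& 1 : Nat) : Int) := by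
  rw [← Int.natCast_shiftRight]
  exact_mod_cast PySem.Int.band_natCast (v >>> j) 1

lemma pvBandOne (v : Nat) :
    PySem.Int.band ((v : Nat) : Int) 1 = ((v &&& 1 : Nat) : Int) := by
  exact_mod_cast PySem.Int.band_natCast v 1

lemma pvBorShift (s g k : Nat) :
    PySem.Int.bor ((s : Int)) (((g : Nat) : Int) <<< k) = ((s ||| g <<< k : Nat) : Int) := by
  rw [← Int.natCast_shiftLeft, PySem.Int.bor_natCast]

-- one step of A's inner loop equals one step of the Nat-level accumulation
lemma pvAStep_lift (xi yi zi : Int) (k : Nat) (hk : k < 32) (s1 s2 s3 : Nat) :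
    pvAStep xi yi zi ((s1 : Int), (s2 : Int), (s3 : Int)) ((k : Nat) : Int)
      = (((s1 ||| pvGX (pvMask xi) (pvMask yi) (pvMask zi) k <<< k : Nat) : Int),
         ((s2 ||| pvGY (pvMask xi) (pvMask yi) (pvMask zi) k <<< k : Nat) : Int),
         ((s3 ||| pvGZ (pvMask xi) (pvMask yi) (pvMask zi) k <<< k : Nat) : Int)) := by
  unfold pvAStep
  simp only [Int.toNat_natCast]
  rw [pvBand_shift_one xi k hk, pvBand_shift_one yi k hk, pvBand_shift_one zi k hk,
    pvVal_lift _ _ _ (pvBit_lt _ _) (pvBit_lt _ _) (pvBit_lt _ _),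
    pvShiftBand, pvShiftBand, pvBandOne, pvBorShift, pvBorShift, pvBorShift]
  rfl

-- the whole inner loop, lifted to a Nat fold
lemma pvFold_lift (xi yi zi : Int) :
    ∀ (l : List Nat), (∀ k ∈ l, k < 32) → ∀ (s1 s2 s3 : Nat),
      (l.map (fun k => ((k : Nat) : Int))).foldl (pvAStep xi yi zi) ((s1 : Int), (s2 : Int), (s3 : Int))
        = (((l.foldl (fun s k => s ||| pvGX (pvMask xi) (pvMask yi) (pvMask zi) k <<< k) s1 : Nat) : Int),
           ((l.foldl (fun s k => s ||| pvGY (pvMask xi) (pvMask yi) (pvMask zi) k <<< k) s2 : Nat) : Int),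
           ((l.foldl (fun s k => s ||| pvGZ (pvMask xi) (pvMask yi) (pvMask zi) k <<< k) s3 : Nat) : Int)) := by
  intro l
  induction l with
  | nil => intro _ s1 s2 s3; rfl
  | cons k t ih =>
      intro h s1 s2 s3
      simp only [List.map_cons, List.foldl_cons]
      rw [pvAStep_lift xi yi zi k (h k (by simp)) s1 s2 s3]
      exact ih (fun j hj => h j (by simp [hj])) _ _ _

-- testBit of the OR-accumulating fold
lemma pvAcc_testBit (g : Nat → Nat) (hg : ∀ k, g k < 2) :
    ∀ (n s j : Nat),
      ((List.range n).foldl (fun s k => s ||| g k <<< k) s).testBit j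
        = (s.testBit j || (decide (j < n) && decide (g j = 1))) := by
  intro n
  induction n with
  | zero => intro s j; simp
  | succ n ih =>
      intro s j
      rw [List.range_succ, List.foldl_append]
      simp only [List.foldl_cons, List.foldl_nil]
      rw [Nat.testBit_or, ih, Nat.testBit_shiftLeft]
      rcases Nat.lt_or_ge j n with hj | hj
      · have : ¬ (j ≥ n) := by omega
        simp only [this, decide_false, Bool.false_and, Bool.or_false]
        have h1 : decide (j < n) = true := by simp [hj]
        have h2 : decide (j < n + 1) = true := by simp; omega
        rw [h1, h2]
      · rcases Nat.eq_or_lt_of_le hj with hj' | hj'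
        · have h2 : (g n).testBit (j - n) = decide (g j = 1) := by
            have hgn := hg n
            have hjn : j = n := by omega
            subst hjn
            interval_cases h : g j <;> simp
          have h0 : decide (j < n) = false := by simp; omega
          have h1 : decide (j < n + 1) = true := by simp; omega
          have h3 : decide (j ≥ n) = true := by simp; omega
          rw [h0, h1, h2, h3]
          simp
        · have h0 : decide (j < n) = false := by simp; omega
          have h1 : decide (j < n + 1) = false := by simp; omega
          have h2 : (g n).testBit (j - n) = false := by
            apply Nat.testBit_lt_two_pow
            calc g n < 2 ^ 1 := by simpa using hg n
            _ ≤ 2 ^ (j - n) := Nat.pow_le_pow_right (by norm_num) (by omega)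
          rw [h0, h1, h2]
          simp

-- bit k of m as a 0/1 value vs. testBit
lemma pvBit_testBit (m k : Nat) : m.testBit k = decide (pvBit m k = 1) := by
  simp [Nat.testBit, pvBit]

-- the heart: the Nat-level loop accumulation equals the bit-sliced Nat formulas
lemma pvCore (mx my mz : Nat) (hx : mx < 2 ^ 32) (hy : my < 2 ^ 32) (hz : mz < 2 ^ 32) :
    ((List.range 32).foldl (fun s k => s ||| pvGX mx my mz k <<< k) 0,
     (List.range 32).foldl (fun s k => s ||| pvGY mx my mz k <<< k) 0,
     (List.range 32).foldl (fun s k => s ||| pvGZ mx my mz k <<< k) 0)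
      = (pvFX mx my mz, pvFY mx my mz, pvFZ mx my mz) := by
  have hMN : ∀ j, pvMN.testBit j = decide (j < 32) := by
    intro j
    rw [show pvMN = 2 ^ 32 - 1 from rfl, Nat.testBit_two_pow_sub_one]
  refine Prod.ext ?_ (Prod.ext ?_ ?_) <;> dsimp only <;>
    apply Nat.eq_of_testBit_eq <;> intro j <;>
    rw [pvAcc_testBit _ (fun k => by
      first
        | exact (by unfold pvGX; rw [Nat.and_one_is_mod]; exact Nat.mod_lt _ (by norm_num))
        | exact (by unfold pvGY; rw [Nat.and_one_is_mod]; exact Nat.mod_lt _ (by norm_num))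
        | exact (by unfold pvGZ; rw [Nat.and_one_is_mod]; exact Nat.mod_lt _ (by norm_num))) 32 0 j] <;>
    simp only [Nat.zero_testBit, Bool.false_or, pvFX, pvFY, pvFZ, Nat.testBit_or,
      Nat.testBit_and, Nat.testBit_xor, hMN] <;>
    rcases Nat.lt_or_ge j 32 with hj | hj
  case _ =>  -- X component, j < 32
    have hxb := pvBit_testBit mx j; have hyb := pvBit_testBit my j; have hzb := pvBit_testBit mz j
    have ha := pvBit_lt mx j; have hb := pvBit_lt my j; have hc := pvBit_lt mz j
    simp only [hj, decide_true, Bool.true_and, hxb, hyb, hzb]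
    unfold pvGX
    interval_cases h1 : pvBit mx j <;> interval_cases h2 : pvBit my j <;>
      interval_cases h3 : pvBit mz j <;> decide
  case _ =>  -- X component, j ≥ 32
    have hxb : mx.testBit j = false := Nat.testBit_lt_two_pow (lt_of_lt_of_le hx (Nat.pow_le_pow_right (by norm_num) hj))
    have hyb : my.testBit j = false := Nat.testBit_lt_two_pow (lt_of_lt_of_le hy (Nat.pow_le_pow_right (by norm_num) hj))
    have hzb : mz.testBit j = false := Nat.testBit_lt_two_pow (lt_of_lt_of_le hz (Nat.pow_le_pow_right (by norm_num) hj))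
    have hj' : decide (j < 32) = false := by simp; omega
    simp [hxb, hyb, hzb, hj']
  case _ =>
    have hxb := pvBit_testBit mx j; have hyb := pvBit_testBit my j; have hzb := pvBit_testBit mz j
    have ha := pvBit_lt mx j; have hb := pvBit_lt my j; have hc := pvBit_lt mz j
    simp only [hj, decide_true, Bool.true_and, hxb, hyb, hzb]
    unfold pvGY
    interval_cases h1 : pvBit mx j <;> interval_cases h2 : pvBit my j <;>
      interval_cases h3 : pvBit mz j <;> decide
  case _ =>
    have hxb : mx.testBit j = false := Nat.testBit_lt_two_pow (lt_of_lt_of_le hx (Nat.pow_le_pow_right (by norm_num) hj))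
    have hyb : my.testBit j = false := Nat.testBit_lt_two_pow (lt_of_lt_of_le hy (Nat.pow_le_pow_right (by norm_num) hj))
    have hzb : mz.testBit j = false := Nat.testBit_lt_two_pow (lt_of_lt_of_le hz (Nat.pow_le_pow_right (by norm_num) hj))
    have hj' : decide (j < 32) = false := by simp; omega
    simp [hxb, hyb, hzb, hj']
  case _ =>
    have hxb := pvBit_testBit mx j; have hyb := pvBit_testBit my j; have hzb := pvBit_testBit mz j
    have ha := pvBit_lt mx j; have hb := pvBit_lt my j; have hc := pvBit_lt mz j
    simp only [hj, decide_true, Bool.true_and, hxb, hyb, hzb]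
    unfold pvGZ
    interval_cases h1 : pvBit mx j <;> interval_cases h2 : pvBit my j <;>
      interval_cases h3 : pvBit mz j <;> decide
  case _ =>
    have hxb : mx.testBit j = false := Nat.testBit_lt_two_pow (lt_of_lt_of_le hx (Nat.pow_le_pow_right (by norm_num) hj))
    have hyb : my.testBit j = false := Nat.testBit_lt_two_pow (lt_of_lt_of_le hy (Nat.pow_le_pow_right (by norm_num) hj))
    have hzb : mz.testBit j = false := Nat.testBit_lt_two_pow (lt_of_lt_of_le hz (Nat.pow_le_pow_right (by norm_num) hj))
    have hj' : decide (j < 32) = false := by simp; omega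
    simp [hxb, hyb, hzb, hj']

-- B's word formulas, lifted to the Nat formulas
lemma pvBWord_cast (mx my mz : Nat) :
    pvBWord ((mx : Nat) : Int) ((my : Nat) : Int) ((mz : Nat) : Int)
      = (((pvFX mx my mz : Nat) : Int), ((pvFY mx my mz : Nat) : Int), ((pvFZ mx my mz : Nat) : Int)) := by
  have hM : pvM = ((pvMN : Nat) : Int) := rfl
  simp only [pvBWord, hM, PySem.Int.bxor_natCast, PySem.Int.band_natCast, PySem.Int.bor_natCast,
    pvFX, pvFY, pvFZ]

-- per-lane equality of the two ports
lemma pvLane_eq (xi yi zi : Int) :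
    pvALane xi yi zi
      = pvBWord (PySem.Int.mod xi 4294967296) (PySem.Int.mod yi 4294967296)
          (PySem.Int.mod zi 4294967296) := by
  unfold pvALane
  rw [show (32 : Int) = ((32 : Nat) : Int) from rfl, PySem.List.pyRange_zero_natCast]
  rw [show ((0, 0, 0) : Int × Int × Int) = (((0 : Nat) : Int), ((0 : Nat) : Int), ((0 : Nat) : Int)) from rfl]
  rw [pvFold_lift xi yi zi (List.range 32) (fun k hk => List.mem_range.mp hk) 0 0 0]
  rw [← pvMask_cast xi, ← pvMask_cast yi, ← pvMask_cast zi, pvBWord_cast]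
  have h := pvCore (pvMask xi) (pvMask yi) (pvMask zi) (pvMask_lt xi) (pvMask_lt yi) (pvMask_lt zi)
  simp only [Prod.mk.injEq] at h
  obtain ⟨h1, h2, h3⟩ := h
  rw [h1, h2, h3]

-- the outer loop: A's fold-with-append equals appending the per-lane maps
lemma pvOuter (l : List (Int × (Int × Int))) :
    ∀ (ax ay az : List Int),
      l.foldl
        (fun (acc : List Int × List Int × List Int) t =>
          let s := pvALane t.1 t.2.1 t.2.2
          (acc.1 ++ [s.1], acc.2.1 ++ [s.2.1], acc.2.2 ++ [s.2.2]))
        (ax, ay, az)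
      = (ax ++ l.map (fun t => (pvALane t.1 t.2.1 t.2.2).1),
         ay ++ l.map (fun t => (pvALane t.1 t.2.1 t.2.2).2.1),
         az ++ l.map (fun t => (pvALane t.1 t.2.1 t.2.2).2.2)) := by
  induction l with
  | nil => intro ax ay az; simp
  | cons t r ih =>
      intro ax ay az
      simp only [List.foldl_cons, List.map_cons]
      rw [ih]
      simp [List.append_assoc]

-- ===== VERDICT (by name: the statement is the Claim_ definition above) =====
theorem sbox_lanes_spec : Claim_equal_sbox_lanes := by
  intro x y z _
  unfold Spec_sbox_lanes sbox_lanes sbox_lanes_alt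
  rw [pvOuter]
  simp [List.map_map, Function.comp, pvLane_eq]
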